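-- pv_equiv track=rewrite | github.com/edithturn/leetcode-training | EASY-Arrays/1869-Longer-Contiguous-Segments-of-Ones-than-Zeros.py | checkZeroOnes
-- ===== SOURCE A (Python) =====
-- def checkZeroOnes(s):
--     """
--     First Approach Brute Force: One iteration, and check longest segment of ones and zeros, reset the values each tiem that is not continue.
--     Save the lingest contiguous segment and compare them after the loop.
--     ||======= Big O ======= ||
--     * Time complexity : O(n)
--     * Space complexity: O(1)
--     """
--     mayor_1 = 0
--     mayor_0 = 0
--     tmp_0 = 0
--     tmp_1 = 0
--
--     for i in s:
--         if i == '1':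
--             tmp_1 += 1
--             if tmp_1 > mayor_1:
--                 mayor_1 = tmp_1
--             tmp_0 = 0
--         elif i == '0':
--             tmp_0 += 1
--             if tmp_0 > mayor_0:
--                 mayor_0 = tmp_0
--             tmp_1 = 0
--
--     if mayor_1 > mayor_0:
--         return True
--
--     return False
-- ===== SOURCE B (Python) =====
-- def checkZeroOnes(s):
--     longest_ones = max(seg.count('1') for seg in s.split('0'))
--     longest_zeros = max(seg.count('0') for seg in s.split('1'))
--     return longest_ones > longest_zeros
-- ===== Notes on version B (the rewrite author's own statement) =====
-- stated objective: idiomatic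
-- what changed: Replaces A's single-pass four-counter scan with string splitting: split on the zero digit and take the max per-segment count of ones for the longest ones-run, and symmetrically for the longest zeros-run.
import Mathlib
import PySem

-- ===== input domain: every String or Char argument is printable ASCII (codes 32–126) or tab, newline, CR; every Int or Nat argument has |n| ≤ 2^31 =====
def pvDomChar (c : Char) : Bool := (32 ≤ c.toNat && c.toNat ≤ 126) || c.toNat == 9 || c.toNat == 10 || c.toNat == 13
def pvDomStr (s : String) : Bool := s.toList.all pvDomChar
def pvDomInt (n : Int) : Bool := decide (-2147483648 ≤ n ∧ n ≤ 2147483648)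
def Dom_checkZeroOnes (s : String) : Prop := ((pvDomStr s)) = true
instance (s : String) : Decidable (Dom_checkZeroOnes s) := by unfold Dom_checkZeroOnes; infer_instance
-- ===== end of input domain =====

-- B replaces A's incremental four-counter scan by split-on-the-other-digit plus per-segment counts (more idiomatic; return value only, no side effects involved).

-- ===== PORT A =====
-- one loop step of A: state (mayor_1, mayor_0, tmp_0, tmp_1)
def checkZeroOnesStep (st : Int × Int × Int × Int) (i : Char) : Int × Int × Int × Int :=
  if i == '1' then
    let t1 := st.2.2.2 + 1
    let m1 := if t1 > st.1 then t1 else st.1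
    (m1, st.2.1, 0, t1)
  else if i == '0' then
    let t0 := st.2.2.1 + 1
    let m0 := if t0 > st.2.1 then t0 else st.2.1
    (st.1, m0, t0, 0)
  else st

def checkZeroOnes (s : String) : Bool :=
  let st := s.toList.foldl checkZeroOnesStep (0, 0, 0, 0)
  decide (st.1 > st.2.1)

-- ===== PORT B =====
-- max(xs) for a nonempty Int list (B only ever applies it to s.split(...), which is never empty)
def pyMaxIntD (xs : List Int) : Int := (PySem.List.max? xs (fun x => x)).getD 0

def checkZeroOnes_alt (s : String) : Bool :=
  let ones := pyMaxIntD (((PySem.Str.split? s "0").getD []).map (fun seg => (PySem.Str.count seg "1" : Int)))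
  let zeros := pyMaxIntD (((PySem.Str.split? s "1").getD []).map (fun seg => (PySem.Str.count seg "0" : Int)))
  decide (ones > zeros)

-- ===== PRECONDITION & SPEC =====
def Spec_checkZeroOnes (s : String) (out : Bool) : Prop := out = checkZeroOnes_alt s
instance (s : String) (out : Bool) : Decidable (Spec_checkZeroOnes s out) := by unfold Spec_checkZeroOnes; infer_instance

-- ===== CLAIM (what is proved, stated in full; the proofs are below) =====
def Claim_equal_checkZeroOnes : Prop := ∀ (s : String), Dom_checkZeroOnes s → Spec_checkZeroOnes s (checkZeroOnes s)

-- ===== LEMMAS AND PROOFS =====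

-- one side of A's scan: running (mayor, tmp) for character `one`, reset on `zero`
def gSide (one zero : Char) (mt : Int × Int) (c : Char) : Int × Int :=
  if c == one then (if mt.2 + 1 > mt.1 then mt.2 + 1 else mt.1, mt.2 + 1)
  else if c == zero then (mt.1, 0)
  else mt

theorem foldA_pair (l : List Char) : ∀ (a b c d : Int),
    l.foldl checkZeroOnesStep (a, b, c, d) =
      ((l.foldl (gSide '1' '0') (a, d)).1,
       (l.foldl (gSide '0' '1') (b, c)).1,
       (l.foldl (gSide '0' '1') (b, c)).2,
       (l.foldl (gSide '1' '0') (a, d)).2) := by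
  induction l with
  | nil => intro a b c d; simp
  | cons x xs ih =>
    intro a b c d
    by_cases h1 : x = '1'
    · subst h1; simp [checkZeroOnesStep, gSide, ih]
    · by_cases h0 : x = '0'
      · subst h0; simp [checkZeroOnesStep, gSide, ih]
      · simp [checkZeroOnesStep, gSide, h1, h0, ih]

-- reference split on a single character, Python `s.split(z)`
def splitZ (z : Char) : List Char → List (List Char)
  | [] => [[]]
  | c :: cs =>
    if c = z then [] :: splitZ z cs
    else
      match splitZ z cs with
      | [] => [[c]]
      | h :: t => (c :: h) :: t

theorem splitZ_ne_nil (z : Char) (l : List Char) : splitZ z l ≠ [] := by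
  cases l with
  | nil => simp [splitZ]
  | cons c cs =>
    simp only [splitZ]
    split
    · simp
    · split <;> simp

theorem splitOn_go_eq (z : Char) : ∀ (l : List Char) (fuel : Nat) (cur : List Char)
    (acc : List (List Char)), l.length < fuel →
    PySem.Chars.splitOn.go [z] fuel l cur acc =
      acc.reverse ++ (match splitZ z l with
        | [] => []
        | h :: t => (cur.reverse ++ h) :: t) := by
  intro l
  induction l with
  | nil =>
    intro fuel cur acc hf
    cases fuel with
    | zero => omega
    | succ f => simp [PySem.Chars.splitOn.go, splitZ]
  | cons c cs ih =>
    intro fuel cur acc hf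
    cases fuel with
    | zero => omega
    | succ f =>
      by_cases hc : c = z
      · subst hc
        have hpre : [c].isPrefixOf (c :: cs) = true := by simp [List.isPrefixOf]
        rw [PySem.Chars.splitOn.go, if_pos hpre]
        have hdrop : List.drop [c].length (c :: cs) = cs := rfl
        rw [hdrop, ih f [] (cur.reverse :: acc) (by simpa using Nat.lt_of_succ_lt_succ hf)]
        rcases hsp : splitZ c cs with _ | ⟨h, t⟩
        · exact absurd hsp (splitZ_ne_nil c cs)
        · simp [splitZ, hsp]
      · have hpre : [z].isPrefixOf (c :: cs) = false := by
          simp [List.isPrefixOf]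
          exact fun h => absurd h.symm hc
        rw [PySem.Chars.splitOn.go, if_neg (by simp [hpre])]
        rw [ih f (c :: cur) acc (by simpa using Nat.lt_of_succ_lt_succ hf)]
        rcases hsp : splitZ z cs with _ | ⟨h, t⟩
        · exact absurd hsp (splitZ_ne_nil z cs)
        · simp [splitZ, hc, hsp]

theorem splitOn_eq_splitZ (z : Char) (l : List Char) :
    PySem.Chars.splitOn l [z] = splitZ z l := by
  unfold PySem.Chars.splitOn
  rw [splitOn_go_eq z l (l.length + 1) [] [] (by omega)]
  rcases hsp : splitZ z l with _ | ⟨h, t⟩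
  · exact absurd hsp (splitZ_ne_nil z l)
  · simp

theorem count_go_eq (o : Char) : ∀ (l : List Char) (fuel : Nat) (acc : Nat),
    l.length ≤ fuel →
    PySem.Chars.count.go [o] fuel l acc = acc + l.count o := by
  intro l
  induction l with
  | nil =>
    intro fuel acc _
    cases fuel <;> simp [PySem.Chars.count.go]
  | cons c cs ih =>
    intro fuel acc hf
    cases fuel with
    | zero => simp at hf
    | succ f =>
      by_cases hc : c = o
      · subst hc
        have hpre : [c].isPrefixOf (c :: cs) = true := by simp [List.isPrefixOf]
        rw [PySem.Chars.count.go, if_pos hpre]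
        have hdrop : List.drop [c].length (c :: cs) = cs := rfl
        rw [hdrop, ih f (acc + 1) (by simpa using hf)]
        simp  -- count over cons
        omega
      · have hpre : [o].isPrefixOf (c :: cs) = false := by
          simp [List.isPrefixOf]
          exact fun h => absurd h.symm hc
        rw [PySem.Chars.count.go, if_neg (by simp [hpre])]
        rw [ih f acc (by simpa using hf)]
        simp [hc]

theorem count_single (o : Char) (l : List Char) :
    PySem.Chars.count l [o] = l.count o := by
  unfold PySem.Chars.count
  simp [count_go_eq o l l.length 0 (le_refl _)]

-- A's one-sided scan computes the max over the segments of splitZ of the one-counts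
theorem side_eq (one zero : Char) (hoz : one ≠ zero) : ∀ (l : List Char) (m t : Int),
    0 ≤ t → t ≤ m →
    (l.foldl (gSide one zero) (m, t)).1 =
      (match splitZ zero l with
       | [] => m
       | h :: tl =>
         tl.foldl (fun acc seg => max acc ((seg.count one : Int)))
           (max m (t + (h.count one : Int)))) := by
  intro l
  induction l with
  | nil =>
    intro m t h0 hm
    simp only [List.foldl_nil, splitZ, List.count_nil, Nat.cast_zero, add_zero]
    exact (max_eq_left hm).symm
  | cons c cs ih =>
    intro m t h0 hm
    by_cases hc1 : c = one
    · subst hc1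
      have hstep : gSide c zero (m, t) c = (max m (t + 1), t + 1) := by
        simp [gSide]; omega
      rw [List.foldl_cons, hstep,
        ih (max m (t + 1)) (t + 1) (by omega) (le_max_right _ _)]
      rcases hsp : splitZ zero cs with _ | ⟨h, tl⟩
      · exact absurd hsp (splitZ_ne_nil zero cs)
      · have hz' : ¬ (c = zero) := hoz
        simp only [splitZ, if_neg hz', hsp]
        have hcnt : ((c :: h).count c : Int) = (h.count c : Int) + 1 := by
          simp
        rw [hcnt]
        have : max (max m (t + 1)) (t + 1 + (h.count c : Int))
             = max m (t + (((h.count c : Int)) + 1)) := by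
          have : (0:Int) ≤ (h.count c : Int) := Int.natCast_nonneg _
          omega
        rw [this]
    · by_cases hc0 : c = zero
      · subst hc0
        have hstep : gSide one c (m, t) c = (m, 0) := by
          simp [gSide, hc1]
        rw [List.foldl_cons, hstep, ih m 0 (le_refl _) (by omega)]
        rcases hsp : splitZ c cs with _ | ⟨h, tl⟩
        · exact absurd hsp (splitZ_ne_nil c cs)
        · have hsz : splitZ c (c :: cs) = [] :: h :: tl := by simp [splitZ, hsp]
          simp only [hsz, List.foldl_cons, List.count_nil, Nat.cast_zero]
          congr 1
          have : (0:Int) ≤ (h.count one : Int) := Int.natCast_nonneg _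
          omega
      · have hstep : gSide one zero (m, t) c = (m, t) := by
          simp only [gSide, beq_iff_eq, if_neg hc1, if_neg hc0]
        rw [List.foldl_cons, hstep, ih m t h0 hm]
        rcases hsp : splitZ zero cs with _ | ⟨h, tl⟩
        · exact absurd hsp (splitZ_ne_nil zero cs)
        · simp only [splitZ, if_neg hc0, hsp]
          have hcnt : ((c :: h).count one : Int) = (h.count one : Int) := by
            simp [hc1]
          rw [hcnt]

-- Python max over one side of B = A's one-sided scan from (0,0)
theorem side_value (one zero : Char) (hoz : one ≠ zero) (l : List Char) :
    (l.foldl (gSide one zero) ((0 : Int), (0 : Int))).1 =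
      pyMaxIntD ((splitZ zero l).map (fun seg => ((seg.count one : Int)))) := by
  rw [side_eq one zero hoz l 0 0 (le_refl _) (le_refl _)]
  rcases hsp : splitZ zero l with _ | ⟨h, tl⟩
  · exact absurd hsp (splitZ_ne_nil zero l)
  · simp only [List.map_cons]
    rw [pyMaxIntD, PySem.List.max?_id_cons]
    simp only [Option.getD_some]
    have hstart : max (0 : Int) (0 + (h.count one : Int)) = (h.count one : Int) := by
      have : (0:Int) ≤ (h.count one : Int) := Int.natCast_nonneg _
      omega
    rw [hstart, List.foldl_map]

-- one side of B's port, reduced to splitZ and List.count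
theorem alt_side (s : String) (one zero : Char) (oneS zeroS : String)
    (h1 : oneS.toList = [one]) (h0 : zeroS.toList = [zero]) :
    ((PySem.Str.split? s zeroS).getD []).map (fun seg => ((PySem.Str.count seg oneS : Int)))
      = (splitZ zero s.toList).map (fun seg => ((seg.count one : Int))) := by
  have hsp := PySem.Str.split?_map s zeroS
  rw [h0] at hsp
  rcases hL : PySem.Str.split? s zeroS with _ | L
  · rw [hL] at hsp; simp [PySem.Chars.split?] at hsp
  · rw [hL] at hsp
    simp [PySem.Chars.split?, splitOn_eq_splitZ] at hsp
    simp only [Option.getD_some]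
    rw [← hsp, List.map_map]
    apply List.map_congr_left
    intro seg _
    simp [PySem.Str.count_eq, h1, count_single]

-- ===== VERDICT (by name: the statement is the Claim_ definition above) =====
theorem checkZeroOnes_spec : Claim_equal_checkZeroOnes := by
  intro s _
  unfold Spec_checkZeroOnes checkZeroOnes checkZeroOnes_alt
  rw [foldA_pair]
  simp only
  rw [side_value '1' '0' (by decide) s.toList, side_value '0' '1' (by decide) s.toList]
  rw [alt_side s '1' '0' "1" "0" (by decide) (by decide),
      alt_side s '0' '1' "0" "1" (by decide) (by decide)]
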